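-- pv_equiv track=rewrite | github.com/gabd71/France_IOI | niveau_3/Gestion_de_caractères/Nombre d'amour.py | amour
-- ===== SOURCE A (Python) =====
-- def amour(nom):
--     res = 0
--     for i in nom:
--         res += ord(i)-65
--     while res >= 10:
--         res2 = 0
--         for i in str(res):
--             res2 += int(i)
--         res = res2
--     return res
-- ===== SOURCE B (Python) =====
-- def amour(nom):
--     res = sum(ord(c) - 65 for c in nom)
--     return res if res < 10 else 1 + (res - 1) % 9
-- ===== Notes on version B (the rewrite author's own statement) =====
-- stated objective: simpler
-- what changed: The repeated digit-sum while-loop is replaced by the closed-form digital root 1 + (res - 1) % 9 (returning res unchanged when res < 10), and the character loop becomes a sum() one-liner.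
import Mathlib
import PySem

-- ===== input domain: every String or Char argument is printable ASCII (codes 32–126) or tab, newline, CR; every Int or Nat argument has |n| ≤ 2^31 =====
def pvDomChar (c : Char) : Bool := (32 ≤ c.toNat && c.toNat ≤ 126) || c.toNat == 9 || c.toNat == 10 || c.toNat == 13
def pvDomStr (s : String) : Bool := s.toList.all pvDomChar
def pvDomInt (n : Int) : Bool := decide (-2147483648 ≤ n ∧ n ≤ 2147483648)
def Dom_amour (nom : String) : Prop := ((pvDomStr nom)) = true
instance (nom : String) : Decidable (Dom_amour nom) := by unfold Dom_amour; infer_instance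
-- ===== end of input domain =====

-- B replaces A's repeated digit-sum while-loop by the closed-form digital root
-- 1 + (res - 1) % 9 (res unchanged when res < 10); objective: simpler.

-- ===== PORT A =====

-- int(i) for a one-character string i; exact here: the loop body only runs when
-- res ≥ 10, so every character of str(res) is a decimal digit and ofChars? is some.
def amourChVal (c : Char) : Int := (PySem.Int.ofChars? [c]).getD 0

-- the inner 'for i in str(res): res2 += int(i)' loop
def amourDigitSum (res : Int) : Int :=
  (PySem.Int.toChars res).foldl (fun a c => a + amourChVal c) 0

-- generic accumulator shape of both character loops (used by the termination lemma)
lemma pvFoldlAddMap (f : Char → Int) :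
    ∀ (l : List Char) (s : Int), l.foldl (fun a c => a + f c) s = s + (l.map f).sum := by
  intro l
  induction l with
  | nil => intro s; simp
  | cons c t ih => intro s; simp [List.foldl_cons, ih, add_assoc]

lemma pvChValDigitChar (d : Nat) (hd : d < 10) : amourChVal (Nat.digitChar d) = (d : Int) := by
  interval_cases d <;> decide

lemma pvToDigitsCoreEq :
    ∀ (fuel n : Nat) (acc : List Char), n < fuel → 0 < n →
      Nat.toDigitsCore 10 fuel n acc = ((Nat.digits 10 n).map Nat.digitChar).reverse ++ acc := by
  intro fuel
  induction fuel with
  | zero => intro n acc h _; omega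
  | succ f ih =>
    intro n acc h hn
    rw [Nat.toDigitsCore]
    by_cases hdiv : n / 10 = 0
    · have hlt : n < 10 := by omega
      rw [Nat.digits_def' (by norm_num : 1 < 10) hn]
      simp [hdiv, Nat.mod_eq_of_lt hlt]
    · have hpos : 0 < n / 10 := Nat.pos_of_ne_zero hdiv
      have hlt : n / 10 < f := by
        have : n / 10 < n := Nat.div_lt_self hn (by norm_num)
        omega
      simp only [hdiv, if_false]
      rw [ih (n / 10) (Nat.digitChar (n % 10) :: acc) hlt hpos,
        Nat.digits_def' (by norm_num : 1 < 10) hn]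
      simp

lemma pvDigitSumEq (n : Nat) (h : 0 < n) :
    amourDigitSum (n : Int) = ((Nat.digits 10 n).sum : Int) := by
  unfold amourDigitSum
  have hn : ¬ ((n : Int) < 0) := by exact not_lt.mpr (Int.natCast_nonneg n)
  have htoN : ((n : Int)).toNat = n := Int.toNat_natCast n
  rw [PySem.Int.toChars, if_neg hn, htoN, Nat.toDigits,
    pvToDigitsCoreEq (n + 1) n [] (by omega) h, pvFoldlAddMap]
  have hmap : ((Nat.digits 10 n).map Nat.digitChar).reverse.map amourChVal
      = ((Nat.digits 10 n).map (Nat.cast : Nat → Int)).reverse := by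
    rw [List.map_reverse, List.map_map]
    congr 1
    apply List.map_congr_left
    intro d hd
    exact pvChValDigitChar d (Nat.digits_lt_base (by norm_num) hd)
  rw [List.append_nil, hmap, List.sum_reverse, ← Nat.cast_list_sum, zero_add]

lemma pvSumDigitsLt (n : Nat) (h : 10 ≤ n) : (Nat.digits 10 n).sum < n := by
  rw [Nat.digits_def' (by norm_num : 1 < 10) (by omega)]
  have hle := Nat.digit_sum_le 10 (n / 10)
  simp only [List.sum_cons]
  omega

lemma amourDigitSum_lt (res : Int) (h : 10 ≤ res) :
    (amourDigitSum res).toNat < res.toNat := by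
  have hres : res = ((res.toNat : Nat) : Int) := (Int.toNat_of_nonneg (by omega)).symm
  have h10 : 10 ≤ res.toNat := by omega
  rw [hres, pvDigitSumEq res.toNat (by omega)]
  have := pvSumDigitsLt res.toNat h10
  omega

-- the 'while res >= 10' loop
def amourLoop (res : Int) : Int :=
  if h : 10 ≤ res then amourLoop (amourDigitSum res) else res
  termination_by res.toNat
  decreasing_by exact amourDigitSum_lt res h

-- ord(i) is exact as Char.toNat on every Char
def amour (nom : String) : Int :=
  amourLoop (nom.toList.foldl (fun res c => res + ((c.toNat : Int) - 65)) 0)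

-- ===== PORT B =====
def amour_alt (nom : String) : Int :=
  let res := (nom.toList.map (fun c => (c.toNat : Int) - 65)).sum
  if res < 10 then res else 1 + PySem.Int.mod (res - 1) 9

-- ===== PRECONDITION & SPEC =====
def Spec_amour (nom : String) (out : Int) : Prop := out = amour_alt nom
instance (nom : String) (out : Int) : Decidable (Spec_amour nom out) := by unfold Spec_amour; infer_instance

-- ===== CLAIM (what is proved, stated in full; the proofs are below) =====
def Claim_equal_amour : Prop := ∀ (nom : String), Dom_amour nom → Spec_amour nom (amour nom)

-- ===== LEMMAS AND PROOFS =====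

lemma pvSumDigitsPos (n : Nat) (h : 0 < n) : 0 < (Nat.digits 10 n).sum := by
  induction n using Nat.strong_induction_on with
  | _ n ih =>
    rw [Nat.digits_def' (by norm_num : 1 < 10) h]
    by_cases hdiv : n / 10 = 0
    · simp only [List.sum_cons, hdiv, Nat.digits_zero]
      have : n % 10 = n := Nat.mod_eq_of_lt (by omega)
      omega
    · have := ih (n / 10) (Nat.div_lt_self h (by norm_num)) (Nat.pos_of_ne_zero hdiv)
      simp only [List.sum_cons]
      omega

lemma pvLoopPos : ∀ n : Nat, 0 < n →
    amourLoop (n : Int) = 1 + PySem.Int.mod ((n : Int) - 1) 9 := by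
  intro n
  induction n using Nat.strong_induction_on with
  | _ n ih =>
    intro hn
    by_cases h10 : 10 ≤ n
    · rw [amourLoop, dif_pos (by exact_mod_cast h10), pvDigitSumEq n hn]
      have hslt := pvSumDigitsLt n h10
      have hspos := pvSumDigitsPos n hn
      rw [ih _ hslt hspos]
      have hmod : n % 9 = (Nat.digits 10 n).sum % 9 := Nat.modEq_nine_digits_sum n
      have hmodI : (n : Int) % 9 = ((Nat.digits 10 n).sum : Int) % 9 := by exact_mod_cast hmod
      rw [PySem.Int.mod_eq_emod_of_pos (by norm_num),
        PySem.Int.mod_eq_emod_of_pos (by norm_num)]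
      omega
    · rw [amourLoop, dif_neg (by exact_mod_cast h10),
        PySem.Int.mod_eq_emod_of_pos (by norm_num)]
      omega

lemma pvLoopSmall (res : Int) (h : res < 10) : amourLoop res = res := by
  rw [amourLoop, dif_neg (by omega)]

theorem pvAmourEq (nom : String) : amour nom = amour_alt nom := by
  unfold amour amour_alt
  rw [pvFoldlAddMap (fun c => (c.toNat : Int) - 65), zero_add]
  set res := (nom.toList.map (fun c => (c.toNat : Int) - 65)).sum with hres
  by_cases h : res < 10
  · rw [pvLoopSmall res h, if_pos h]
  · rw [if_neg h]
    have hcast : res = ((res.toNat : Nat) : Int) := (Int.toNat_of_nonneg (by omega)).symm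
    rw [hcast, pvLoopPos res.toNat (by omega)]

-- ===== VERDICT (by name: the statement is the Claim_ definition above) =====
theorem amour_spec : Claim_equal_amour := by
  intro nom _
  unfold Spec_amour
  exact pvAmourEq nom
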